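-- pv_equiv track=rewrite | github.com/an5rag/CSAir | csAir/Graph.py | get_hub_cities
-- ===== SOURCE A (Python) =====
-- def get_hub_cities(graph):
--     """
--     Finds those cities with maximum number of outgoing edges, hence Hub-cities
--     :param graph:
--     :return:
--     """
--     max_connections = 0
--     hub_cities = []
--     # Finding the maximum number of connections
--     for source in graph:
--         no_of_connections  = len(graph[source])
--         if no_of_connections>max_connections:
--             max_connections = no_of_connections
--
--     # Finding all cities having that number of connections
--     for source in graph:
--         no_of_connections  = len(graph[source])
--         if no_of_connections == max_connections:
--             hub_cities.append(source)
--
--     return hub_cities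
-- ===== SOURCE B (Python) =====
-- def get_hub_cities(graph):
--     """
--     Finds those cities with maximum number of outgoing edges, hence Hub-cities
--     (single grouping pass into degree buckets, then the max-degree bucket).
--     """
--     buckets = {}
--     for source, destinations in graph.items():
--         buckets.setdefault(len(destinations), []).append(source)
--     if not buckets:
--         return []
--     return buckets[max(buckets)]
-- ===== Notes on version B (the rewrite author's own statement) =====
-- stated objective: alternative
-- what changed: Replaces A's two full scans (one to find the maximum out-degree, one to collect the cities with it) by a single grouping pass that buckets each city under its out-degree in a dict, then returns the bucket of the maximum key.
import Mathlib
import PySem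

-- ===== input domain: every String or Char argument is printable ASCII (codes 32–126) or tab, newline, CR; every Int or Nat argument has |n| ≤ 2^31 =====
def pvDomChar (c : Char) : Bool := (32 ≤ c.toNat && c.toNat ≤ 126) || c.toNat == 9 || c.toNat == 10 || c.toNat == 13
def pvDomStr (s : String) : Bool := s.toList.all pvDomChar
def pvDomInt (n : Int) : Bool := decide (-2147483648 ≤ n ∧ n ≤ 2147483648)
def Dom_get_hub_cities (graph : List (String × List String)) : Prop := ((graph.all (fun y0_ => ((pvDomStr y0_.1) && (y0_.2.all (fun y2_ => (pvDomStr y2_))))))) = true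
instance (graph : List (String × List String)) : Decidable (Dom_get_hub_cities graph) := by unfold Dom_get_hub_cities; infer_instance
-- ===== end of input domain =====

-- B replaces A's two scans (find max degree, then collect matches) by one grouping
-- pass into degree buckets plus a max-key lookup; same cost, different structure.

-- ===== PORT A =====
-- for source in graph: graph[source] is a dict lookup; keys are present, so getD [] is exact
def get_hub_cities (graph : List (String × List String)) : List String :=
  let max_connections : Int :=
    graph.foldl (fun max_connections source =>
      let no_of_connections : Int := ((PySem.Dict.mk graph).getD source.1 []).length
      if no_of_connections > max_connections then no_of_connections else max_connections) 0
  graph.foldl (fun hub_cities source =>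
    let no_of_connections : Int := ((PySem.Dict.mk graph).getD source.1 []).length
    if no_of_connections == max_connections then hub_cities ++ [source.1] else hub_cities) []

-- ===== PORT B =====
def get_hub_cities_alt (graph : List (String × List String)) : List String :=
  let buckets : PySem.Dict Int (List String) :=
    graph.foldl (fun buckets p =>
      buckets.modify ((p.2.length : Int)) [] (· ++ [p.1])) PySem.Dict.empty
  match PySem.List.max? buckets.keys (fun x => x) with
  | none => []                       -- if not buckets: return []
  | some m => buckets.getD m []      -- return buckets[max(buckets)]

-- ===== PRECONDITION & SPEC =====
-- Pre_ excludes association lists with duplicate source keys: graph is a Python dict,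
-- which cannot contain a duplicate key (building one collapses the duplicates), so such
-- lists do not represent any input A actually receives.
def Pre_get_hub_cities (graph : List (String × List String)) : Prop :=
  (graph.map Prod.fst).Nodup
instance (graph : List (String × List String)) : Decidable (Pre_get_hub_cities graph) := by
  unfold Pre_get_hub_cities; infer_instance

def pvWitness_get_hub_cities : (List (String × List String)) :=
  [("a", ["b", "c"]), ("b", []), ("c", ["a", "b"])]

def Spec_get_hub_cities (graph : List (String × List String)) (out : List String) : Prop := out = get_hub_cities_alt graph
instance (graph : List (String × List String)) (out : List String) : Decidable (Spec_get_hub_cities graph out) := by unfold Spec_get_hub_cities; infer_instance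

-- ===== CLAIM (what is proved, stated in full; the proofs are below) =====
def Claim_equal_get_hub_cities : Prop := ∀ (graph : List (String × List String)), Dom_get_hub_cities graph → Pre_get_hub_cities graph → Spec_get_hub_cities graph (get_hub_cities graph)

-- ===== LEMMAS AND PROOFS =====

-- under unique keys, the dict lookup A performs returns each pair's own value
theorem lookup_self (graph : List (String × List String))
    (h : (graph.map Prod.fst).Nodup) (p : String × List String) (hp : p ∈ graph) :
    (PySem.Dict.mk graph).getD p.1 [] = p.2 := by
  apply PySem.Dict.getD_of_mem_items (k := p.1) (v := p.2)
  · simpa [PySem.Dict.items] using hp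
  · simpa [PySem.Dict.keys] using h

-- A's result, written as filter-then-map of the true degrees
theorem A_eq_filter (graph : List (String × List String))
    (h : (graph.map Prod.fst).Nodup) :
    get_hub_cities graph =
      (graph.filter (fun p => ((p.2.length : Int)) ==
          graph.foldl (fun a p => max a ((p.2.length : Int))) 0)).map Prod.fst := by
  unfold get_hub_cities
  have hmax : graph.foldl (fun max_connections source =>
      let no_of_connections : Int := ((PySem.Dict.mk graph).getD source.1 []).length
      if no_of_connections > max_connections then no_of_connections else max_connections) 0
      = graph.foldl (fun a p => max a ((p.2.length : Int))) 0 := by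
    apply PySem.List.foldl_congr_mem
    intro acc p hp
    simp only [lookup_self graph h p hp]
    omega
  rw [hmax]
  have hcol : graph.foldl (fun hub_cities source =>
      let no_of_connections : Int := ((PySem.Dict.mk graph).getD source.1 []).length
      if no_of_connections == graph.foldl (fun a p => max a ((p.2.length : Int))) 0
        then hub_cities ++ [source.1] else hub_cities) ([] : List String)
      = graph.foldl (fun hub_cities p =>
        if ((p.2.length : Int)) == graph.foldl (fun a p => max a ((p.2.length : Int))) 0
          then hub_cities ++ [p.1] else hub_cities) [] := by
    apply PySem.List.foldl_congr_mem
    intro acc p hp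
    simp only [lookup_self graph h p hp]
  rw [hcol, PySem.List.foldl_append_if
      (fun p : String × List String => ((p.2.length : Int)) == graph.foldl (fun a p => max a ((p.2.length : Int))) 0)
      Prod.fst graph []]
  simp

-- B's bucket dictionary: its bucket at c, and its key list
theorem buckets_getD (graph : List (String × List String)) (c : Int) :
    (graph.foldl (fun buckets p =>
        buckets.modify ((p.2.length : Int)) [] (· ++ [p.1])) PySem.Dict.empty).getD c []
      = (graph.filter (fun p => ((p.2.length : Int)) == c)).map Prod.fst := by
  have hmap : graph.foldl (fun buckets p =>
        buckets.modify ((p.2.length : Int)) [] (· ++ [p.1])) PySem.Dict.empty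
      = (graph.map (fun p => (((p.2.length : Int)), p.1))).foldl
          (fun d r => d.modify r.1 [] (· ++ [r.2])) PySem.Dict.empty := by
    rw [List.foldl_map]
  rw [hmap, PySem.Dict.getD_foldl_modify_append]
  simp [List.filter_map, Function.comp_def]

theorem buckets_keys (graph : List (String × List String)) :
    (graph.foldl (fun buckets p =>
        buckets.modify ((p.2.length : Int)) [] (· ++ [p.1])) PySem.Dict.empty).keys
      = PySem.Set.ofList (graph.map (fun p => ((p.2.length : Int)))) := by
  rw [PySem.Dict.keys_foldl_modify_key graph (fun p => ((p.2.length : Int))) []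
        (fun _ p => (· ++ [p.1])) PySem.Dict.empty,
      PySem.Dict.keys_empty, PySem.Set.update_nil_left]

theorem get_hub_cities_spec : Claim_equal_get_hub_cities := by
  intro graph _ hpre
  unfold Spec_get_hub_cities
  rw [A_eq_filter graph hpre]
  unfold get_hub_cities_alt
  simp only [buckets_keys, buckets_getD]
  rcases hk : PySem.Set.ofList (graph.map (fun p => ((p.2.length : Int)))) with _ | ⟨k0, rest⟩
  · -- empty key set: graph is empty
    have hg : graph = [] := by
      rcases graph with _ | ⟨p, t⟩
      · rfl
      · exfalso
        have : ((p.2.length : Int)) ∈ PySem.Set.ofList ((p :: t).map (fun p => ((p.2.length : Int)))) := by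
          rw [PySem.Set.mem_ofList]; simp
        rw [hk] at this; simp at this
    subst hg
    simp [PySem.List.max?]
  · -- nonempty: the max key equals A's running maximum
    rw [hk, PySem.List.max?_id_cons]
    set ds := graph.map (fun p => ((p.2.length : Int))) with hds
    have hmem_ds : ∀ y, y ∈ (k0 :: rest) → y ∈ ds := by
      intro y hy
      rw [← PySem.Set.mem_ofList (xs := ds), hk]; exact hy
    have hds_nonneg : ∀ y ∈ ds, (0 : Int) ≤ y := by
      intro y hy
      rw [hds, List.mem_map] at hy
      obtain ⟨p, _, rfl⟩ := hy
      positivity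
    have hM : graph.foldl (fun a p => max a ((p.2.length : Int))) 0 = ds.foldl max 0 := by
      rw [hds, List.foldl_map]
    have hK_mem : rest.foldl max k0 ∈ ds := by
      apply hmem_ds
      rcases PySem.List.foldl_max_mem rest k0 with h | h
      · rw [h]; exact List.mem_cons_self
      · exact List.mem_cons_of_mem _ h
    have h1 : rest.foldl max k0 ≤ ds.foldl max 0 :=
      (PySem.List.le_foldl_max ds 0).2 _ hK_mem
    have h2 : ds.foldl max 0 ≤ rest.foldl max k0 := by
      rcases PySem.List.foldl_max_mem ds 0 with h | h
      · rw [h]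
        have hk0 : (0 : Int) ≤ k0 := hds_nonneg k0 (hmem_ds k0 List.mem_cons_self)
        have := (PySem.List.le_foldl_max rest k0).1
        omega
      · rw [← PySem.Set.mem_ofList (xs := ds), hk, List.mem_cons] at h
        rcases h with h | h
        · rw [h]; exact (PySem.List.le_foldl_max rest k0).1
        · exact (PySem.List.le_foldl_max rest k0).2 _ h
    rw [hM, le_antisymm h1 h2]
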